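-- pv_equiv track=rewrite | github.com/deepset-ai/haystack | haystack/preview/components/preprocessors/document_splitter.py | _split_into_units
-- ===== SOURCE A (Python) =====
-- from typing import List, Literal
--
-- def _split_into_units(text: str, split_by: Literal["word", "sentence", "passage"]) -> List[str]:
--     if split_by == "passage":
--         split_at = "\n\n"
--     elif split_by == "sentence":
--         split_at = "."
--     elif split_by == "word":
--         split_at = " "
--     else:
--         raise NotImplementedError(
--             "DocumentSplitter only supports 'passage', 'sentence' or 'word' split_by options."
--         )
--     units = text.split(split_at)
--     # Add the delimiter back to all units except the last one
--     for i in range(len(units) - 1):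
--         units[i] += split_at
--     return units
-- ===== SOURCE B (Python) =====
-- def _split_into_units(text, split_by):
--     if split_by == "passage":
--         split_at = "\n\n"
--     elif split_by == "sentence":
--         split_at = "."
--     elif split_by == "word":
--         split_at = " "
--     else:
--         raise NotImplementedError(
--             "DocumentSplitter only supports 'passage', 'sentence' or 'word' split_by options."
--         )
--     # Scan for the delimiter and emit each unit with its delimiter attached directly,
--     # instead of splitting first and re-appending the delimiter in a second pass.
--     units = []
--     rest = text
--     while True:
--         pos = rest.find(split_at)
--         if pos == -1:
--             units.append(rest)
--             return units
--         cut = pos + len(split_at)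
--         units.append(rest[:cut])
--         rest = rest[cut:]
-- ===== Notes on version B (the rewrite author's own statement) =====
-- stated objective: alternative
-- what changed: B replaces A's split-into-units-then-reappend-delimiter two-pass approach with a single find-loop that emits each unit with its delimiter already attached, so the second index loop over the units disappears.
import Mathlib
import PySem

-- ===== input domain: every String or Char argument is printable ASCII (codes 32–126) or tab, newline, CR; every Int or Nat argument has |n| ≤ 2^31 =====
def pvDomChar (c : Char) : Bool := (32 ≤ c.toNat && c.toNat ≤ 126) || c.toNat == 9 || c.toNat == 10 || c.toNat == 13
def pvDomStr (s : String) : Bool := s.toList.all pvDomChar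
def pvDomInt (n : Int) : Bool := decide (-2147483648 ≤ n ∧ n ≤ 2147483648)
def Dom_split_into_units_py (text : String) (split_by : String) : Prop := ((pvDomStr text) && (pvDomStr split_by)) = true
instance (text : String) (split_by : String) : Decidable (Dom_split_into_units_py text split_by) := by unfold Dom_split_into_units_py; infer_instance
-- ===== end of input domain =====

-- B replaces split-then-reappend-delimiter with a single find-loop that emits each unit with its delimiter attached; alternative decomposition, same cost.

-- ===== PORT A =====
-- units = text.split(split_at); for i in range(len(units)-1): units[i] += split_at
def splitUnitsA (t sep : List Char) : List (List Char) :=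
  let units := PySem.Chars.splitOn t sep
  (List.range (units.length - 1)).foldl (fun us i => us.set i ((us.getD i []) ++ sep)) units

def split_into_units_py (text : String) (split_by : String) : List String :=
  if split_by == "passage" then (splitUnitsA text.toList ['\n', '\n']).map String.mk
  else if split_by == "sentence" then (splitUnitsA text.toList ['.']).map String.mk
  else if split_by == "word" then (splitUnitsA text.toList [' ']).map String.mk
  else []  -- Python raises NotImplementedError here; excluded by Pre_

-- ===== PORT B =====
-- while True: pos = rest.find(split_at); if pos == -1: append rest, done; else append rest[:pos+len], rest = rest[pos+len:]
def splitUnitsB (sep t : List Char) (hsep : sep ≠ []) : List (List Char) :=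
  let r := PySem.Chars.find t sep
  if r = -1 then [t]
  else
    let cut := r.toNat + sep.length
    t.take cut :: splitUnitsB sep (t.drop cut) hsep
termination_by t.length
decreasing_by
  have h0 : sep <:+: t := (PySem.Chars.find_ne_neg_one_iff t sep).mp (by assumption)
  have h1 := h0.length_le
  have h2 : 1 ≤ sep.length := List.length_pos_iff.mpr hsep
  simp only [List.length_drop]
  omega

def split_into_units_py_alt (text : String) (split_by : String) : List String :=
  if split_by == "passage" then (splitUnitsB ['\n', '\n'] text.toList (by simp)).map String.mk
  else if split_by == "sentence" then (splitUnitsB ['.'] text.toList (by simp)).map String.mk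
  else if split_by == "word" then (splitUnitsB [' '] text.toList (by simp)).map String.mk
  else []  -- Python raises NotImplementedError here; excluded by Pre_

-- ===== PRECONDITION & SPEC =====
-- Pre_ excludes exactly the split_by values on which A raises NotImplementedError.
def Pre_split_into_units_py (_text : String) (split_by : String) : Prop :=
  split_by = "passage" ∨ split_by = "sentence" ∨ split_by = "word"
instance (text : String) (split_by : String) : Decidable (Pre_split_into_units_py text split_by) := by unfold Pre_split_into_units_py; infer_instance
def pvWitness_split_into_units_py : String × String := ("a b c", "word")

def Spec_split_into_units_py (text : String) (split_by : String) (out : List String) : Prop := out = split_into_units_py_alt text split_by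
instance (text : String) (split_by : String) (out : List String) : Decidable (Spec_split_into_units_py text split_by out) := by unfold Spec_split_into_units_py; infer_instance

-- ===== CLAIM (what is proved, stated in full; the proofs are below) =====
def Claim_equal_split_into_units_py : Prop := ∀ (text : String) (split_by : String), Dom_split_into_units_py text split_by → Pre_split_into_units_py text split_by → Spec_split_into_units_py text split_by (split_into_units_py text split_by)

-- ===== LEMMAS AND PROOFS =====

-- the pure split (no delimiter attached), same recursion shape as splitUnitsB
def pureSplit (sep t : List Char) (hsep : sep ≠ []) : List (List Char) :=
  let r := PySem.Chars.find t sep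
  if r = -1 then [t]
  else t.take r.toNat :: pureSplit sep (t.drop (r.toNat + sep.length)) hsep
termination_by t.length
decreasing_by
  have h0 : sep <:+: t := (PySem.Chars.find_ne_neg_one_iff t sep).mp (by assumption)
  have h1 := h0.length_le
  have h2 : 1 ≤ sep.length := List.length_pos_iff.mpr hsep
  simp only [List.length_drop]
  omega

-- append sep to every element but the last
def addSep (sep : List Char) : List (List Char) → List (List Char)
  | [] => []
  | [x] => [x]
  | x :: y :: xs => (x ++ sep) :: addSep sep (y :: xs)

theorem find_go_shift (sub : List Char) : ∀ (s : List Char) (k : Nat),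
    PySem.Chars.find.go sub s k =
      if PySem.Chars.find.go sub s 0 = -1 then -1 else PySem.Chars.find.go sub s 0 + k := by
  intro s
  induction s with
  | nil => intro k; simp [PySem.Chars.find.go]; split <;> simp
  | cons c t ih =>
    intro k
    simp only [PySem.Chars.find.go]
    by_cases hp : sub.isPrefixOf (c :: t)
    · simp [hp]
    · simp only [hp, if_false, Bool.false_eq_true]
      rw [ih (k + 1), ih (0 + 1)]
      have h0 : -1 ≤ PySem.Chars.find.go sub t 0 := by
        have := PySem.Chars.neg_one_le_find t sub
        simpa [PySem.Chars.find] using this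
      by_cases hm : PySem.Chars.find.go sub t 0 = -1
      · simp [hm]
      · have hne : ¬ (PySem.Chars.find.go sub t 0 + ((0 : Nat) + 1 : Nat) = -1) := by
          push_cast; omega
        simp only [hm, if_false, hne]
        push_cast
        omega

theorem find_nil (sep : List Char) (hsep : sep ≠ []) : PySem.Chars.find [] sep = -1 := by
  simp [PySem.Chars.find, PySem.Chars.find.go, List.isEmpty_iff, hsep]

theorem find_cons (sep : List Char) (c : Char) (t : List Char) :
    PySem.Chars.find (c :: t) sep =
      if sep.isPrefixOf (c :: t) then 0
      else if PySem.Chars.find t sep = -1 then -1 else PySem.Chars.find t sep + 1 := by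
  simp only [PySem.Chars.find, PySem.Chars.find.go]
  split
  · norm_num
  · rw [find_go_shift]
    norm_num

theorem pureSplit_ne_nil (sep t : List Char) (hsep : sep ≠ []) : pureSplit sep t hsep ≠ [] := by
  rw [pureSplit]
  split <;> simp

theorem pureSplit_cons (sep : List Char) (hsep : sep ≠ []) (c : Char) (t : List Char)
    (h : ¬ sep.isPrefixOf (c :: t)) :
    pureSplit sep (c :: t) hsep = (pureSplit sep t hsep).modifyHead (c :: ·) := by
  have hf := find_cons sep c t
  rw [if_neg h] at hf
  have h0 : -1 ≤ PySem.Chars.find t sep := PySem.Chars.neg_one_le_find t sep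
  by_cases hm : PySem.Chars.find t sep = -1
  · rw [if_pos hm] at hf
    conv_lhs => rw [pureSplit]
    conv_rhs => rw [pureSplit]
    simp [hf, hm]
  · rw [if_neg hm] at hf
    have hne : ¬ (PySem.Chars.find t sep + 1 = -1) := by omega
    have ht : (PySem.Chars.find t sep + 1).toNat = (PySem.Chars.find t sep).toNat + 1 := by omega
    have hd : ((PySem.Chars.find t sep).toNat + 1) + sep.length = ((PySem.Chars.find t sep).toNat + sep.length) + 1 := by omega
    conv_lhs => rw [pureSplit]
    conv_rhs => rw [pureSplit]
    simp only [hf, if_neg hne, if_neg hm, ht, hd, List.modifyHead,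
      List.take_succ_cons, List.drop_succ_cons]

theorem addSep_cons (sep : List Char) (a : List Char) (l : List (List Char)) (hl : l ≠ []) :
    addSep sep (a :: l) = (a ++ sep) :: addSep sep l := by
  cases l with
  | nil => exact absurd rfl hl
  | cons y ys => rfl

theorem go_spec (sep : List Char) (hsep : sep ≠ []) :
    ∀ (fuel : Nat) (l cur : List Char) (hacc : List (List Char)),
      l.length < fuel →
      PySem.Chars.splitOn.go sep fuel l cur hacc =
        hacc.reverse ++ (pureSplit sep l hsep).modifyHead (cur.reverse ++ ·) := by
  intro fuel
  induction fuel with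
  | zero => intro l cur hacc h; omega
  | succ fuel ih =>
    intro l cur hacc hlen
    cases l with
    | nil =>
      rw [pureSplit]
      simp [PySem.Chars.splitOn.go, find_nil sep hsep, List.modifyHead]
    | cons c rest =>
      have hsl : 1 ≤ sep.length := List.length_pos_iff.mpr hsep
      by_cases hp : sep.isPrefixOf (c :: rest)
      · have hstep : PySem.Chars.splitOn.go sep (fuel + 1) (c :: rest) cur hacc =
            PySem.Chars.splitOn.go sep fuel ((c :: rest).drop sep.length) [] (cur.reverse :: hacc) := by
          simp [PySem.Chars.splitOn.go, hp]
        have hlt : ((c :: rest).drop sep.length).length < fuel := by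
          simp only [List.length_drop, List.length_cons]
          simp only [List.length_cons] at hlen
          omega
        rw [hstep, ih _ _ _ hlt]
        have hfind : PySem.Chars.find (c :: rest) sep = 0 := by
          simp [PySem.Chars.find, PySem.Chars.find.go, hp]
        conv_rhs => rw [pureSplit]
        cases hS : pureSplit sep ((c :: rest).drop sep.length) hsep with
        | nil => exact absurd hS (pureSplit_ne_nil sep _ hsep)
        | cons x xs => simp [hfind, hS, List.modifyHead]
      · have hstep : PySem.Chars.splitOn.go sep (fuel + 1) (c :: rest) cur hacc =
            PySem.Chars.splitOn.go sep fuel rest (c :: cur) hacc := by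
          simp [PySem.Chars.splitOn.go, hp]
        have hlt : rest.length < fuel := by
          simp only [List.length_cons] at hlen; omega
        rw [hstep, ih _ _ _ hlt, pureSplit_cons sep hsep c rest hp]
        cases hS : pureSplit sep rest hsep with
        | nil => exact absurd hS (pureSplit_ne_nil sep _ hsep)
        | cons x xs => simp [List.modifyHead]

theorem splitOn_eq_pureSplit (sep t : List Char) (hsep : sep ≠ []) :
    PySem.Chars.splitOn t sep = pureSplit sep t hsep := by
  rw [PySem.Chars.splitOn, go_spec sep hsep (t.length + 1) t [] [] (by omega)]
  cases hS : pureSplit sep t hsep with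
  | nil => exact absurd hS (pureSplit_ne_nil sep _ hsep)
  | cons x xs => simp [List.modifyHead]

theorem addSep_eq_take_drop (sep : List Char) : ∀ (us : List (List Char)),
    addSep sep us = (us.take (us.length - 1)).map (· ++ sep) ++ us.drop (us.length - 1) := by
  intro us
  induction us with
  | nil => simp [addSep]
  | cons x l ih =>
    cases l with
    | nil => simp [addSep]
    | cons y ys =>
      rw [addSep_cons sep x (y :: ys) (by simp), ih]
      simp only [List.length_cons]
      simp

theorem foldl_range_eq (sep : List Char) : ∀ (k : Nat) (us : List (List Char)), k ≤ us.length →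
    (List.range k).foldl (fun a i => a.set i (a.getD i [] ++ sep)) us =
      (us.take k).map (· ++ sep) ++ us.drop k := by
  intro k
  induction k with
  | zero => intro us h; simp
  | succ k ih =>
    intro us h
    rw [List.range_succ, List.foldl_append, ih us (by omega)]
    have hk : k < us.length := by omega
    have hlen : ((us.take k).map (· ++ sep)).length = k := by
      simp [List.length_take]; omega
    have hdrop : us.drop k = us[k] :: us.drop (k + 1) := List.drop_eq_getElem_cons hk
    simp only [List.foldl_cons, List.foldl_nil]
    rw [hdrop]
    have hget : (((us.take k).map (· ++ sep)) ++ us[k] :: us.drop (k + 1)).getD k [] = us[k] := by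
      rw [List.getD_eq_getElem?_getD, List.getElem?_append_right (by omega)]
      have hz : k - ((us.take k).map (· ++ sep)).length = 0 := by omega
      rw [hz]
      simp [List.getElem?_eq_getElem hk]
    rw [hget]
    rw [List.set_append_right _ _ (by omega)]
    simp only [hlen, Nat.sub_self, List.set_cons_zero]
    have htake : us.take (k + 1) = us.take k ++ [us[k]] := by
      rw [List.take_succ, List.getElem?_eq_getElem hk]
      rfl
    have hk' : k < (us.map (· ++ sep)).length := by simpa using hk
    have hfinal : List.take (k + 1) (us.map (· ++ sep)) = List.take k (us.map (· ++ sep)) ++ [us[k] ++ sep] := by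
      rw [List.take_succ, List.getElem?_eq_getElem hk']
      simp
    simp [hfinal]

theorem take_add_of_prefix (sep t : List Char) (k : Nat) (hpre : sep <+: t.drop k) :
    t.take (k + sep.length) = t.take k ++ sep := by
  obtain ⟨r, hr⟩ := hpre
  rw [List.take_add, ← hr, List.take_left]

theorem B_eq_addSep (sep : List Char) (hsep : sep ≠ []) :
    ∀ (n : Nat) (t : List Char), t.length ≤ n →
      splitUnitsB sep t hsep = addSep sep (pureSplit sep t hsep) := by
  intro n
  induction n with
  | zero =>
    intro t ht
    have : t = [] := List.eq_nil_of_length_eq_zero (by omega)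
    subst this
    rw [splitUnitsB, pureSplit]
    simp [find_nil sep hsep, addSep]
  | succ n ih =>
    intro t ht
    by_cases hm : PySem.Chars.find t sep = -1
    · rw [splitUnitsB, pureSplit]
      simp [hm, addSep]
    · have h0 : -1 ≤ PySem.Chars.find t sep := PySem.Chars.neg_one_le_find t sep
      have hnn : 0 ≤ PySem.Chars.find t sep := by omega
      have hinf : sep <+: t.drop (PySem.Chars.find t sep).toNat :=
        (PySem.Chars.find_spec hnn).1
      have hsl : 1 ≤ sep.length := List.length_pos_iff.mpr hsep
      have hle : (PySem.Chars.find t sep).toNat + sep.length ≤ t.length := by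
        have := hinf.length_le
        simp only [List.length_drop] at this
        have hfl := PySem.Chars.find_le_length t sep
        omega
      rw [splitUnitsB, pureSplit]
      simp only [hm, if_false]
      rw [addSep_cons sep _ _ (pureSplit_ne_nil sep _ hsep)]
      rw [← ih (t.drop ((PySem.Chars.find t sep).toNat + sep.length)) (by simp only [List.length_drop]; omega)]
      rw [take_add_of_prefix sep t _ hinf]

theorem branch_eq (sep : List Char) (hsep : sep ≠ []) (t : List Char) :
    splitUnitsA t sep = splitUnitsB sep t hsep := by
  unfold splitUnitsA
  rw [splitOn_eq_pureSplit sep t hsep]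
  rw [foldl_range_eq sep _ _ (by omega)]
  rw [B_eq_addSep sep hsep t.length t le_rfl, addSep_eq_take_drop]

-- ===== VERDICT (by name: the statement is the Claim_ definition above) =====
theorem split_into_units_py_spec : Claim_equal_split_into_units_py := by
  intro text split_by _ hpre
  unfold Spec_split_into_units_py split_into_units_py split_into_units_py_alt
  rcases hpre with h | h | h <;> subst h <;> simp <;> rw [branch_eq _ (by simp)]
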